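-- pv_equiv track=rewrite | github.com/denisefavila/training | interview/interview/max_distance_binary_strings.py | get_max_distance_binary_strings_brute_fore
-- ===== SOURCE A (Python) =====
-- from typing import Any, Dict, List
--
-- def get_max_distance_binary_strings_brute_fore(binary_strings: List[str]):
--     """
--
--     The distance between 2 binary strings is the sum of their lengths after
--     removing the common prefix. For example: the common prefix of 1011000 and 1011110
--     is 1011 so the distance is len("000") + len("110") = 3 + 3 = 6.
--
--     Given a list of binary strings, pick a pair that gives you maximum distance among all possible pair and return that distance.
--     """
--
--     def common_prefix_length(str1: str, str2: str):
--         # common preffix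
--         size_1 = len(str1)
--         size_2 = len(str2)
--
--         i = 0
--         while i < size_1 and i < size_2 and str1[i] == str2[i]:
--             i += 1
--
--         return i
--
--     if not binary_strings:
--         return 0
--
--     max_distance = 0
--     for i in range(len(binary_strings)):
--         for j in range(i + 1, len(binary_strings)):
--             common_length = common_prefix_length(binary_strings[i], binary_strings[j])
--             current_distance = (len(binary_strings[i]) - common_length) + (
--                 len(binary_strings[j]) - common_length
--             )
--             max_distance = max(max_distance, current_distance)
--
--     return max_distance
-- ===== SOURCE B (Python) =====
-- from typing import List
--
--
-- def get_max_distance_binary_strings_brute_fore(binary_strings: List[str]):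
--     """Trie-style divide and conquer: at each node the best cross-group pair
--     distance is the sum of the two largest (1 + deepest-tail) values over the
--     first-character groups (an empty string contributes 0), and same-group
--     pairs are handled by recursing on the groups' tails."""
--
--     def solve(strings):
--         vals = []
--         groups = []
--         if any(s == "" for s in strings):
--             vals.append(0)
--         for c in dict.fromkeys(s[0] for s in strings if s):
--             tails = [s[1:] for s in strings if s and s[0] == c]
--             vals.append(1 + max(len(t) for t in tails))
--             groups.append(tails)
--         vs = sorted(vals, reverse=True)
--         best = vs[0] + vs[1] if len(vs) > 1 else 0
--         for g in groups:
--             best = max(best, solve(g))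
--         return best
--
--     return solve(binary_strings)
-- ===== Notes on version B (the rewrite author's own statement) =====
-- stated objective: faster
-- what changed: Replaced the all-pairs common-prefix scan with a trie-style divide and conquer: group strings by first character, take the sum of the two largest (1 + deepest tail) group values for cross-group pairs, and recurse on each group's tails for same-group pairs.
import Mathlib
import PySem

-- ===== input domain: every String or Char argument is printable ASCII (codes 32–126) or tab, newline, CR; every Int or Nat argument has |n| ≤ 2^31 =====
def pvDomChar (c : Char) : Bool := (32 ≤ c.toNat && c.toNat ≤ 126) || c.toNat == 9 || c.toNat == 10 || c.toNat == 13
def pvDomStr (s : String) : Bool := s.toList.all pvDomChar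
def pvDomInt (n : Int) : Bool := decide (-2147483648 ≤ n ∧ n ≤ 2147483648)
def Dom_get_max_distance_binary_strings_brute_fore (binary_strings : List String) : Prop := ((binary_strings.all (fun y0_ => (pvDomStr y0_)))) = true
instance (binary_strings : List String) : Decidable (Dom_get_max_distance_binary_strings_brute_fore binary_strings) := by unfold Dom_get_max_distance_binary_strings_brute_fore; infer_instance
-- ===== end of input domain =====

-- B replaces A's all-pairs O(n^2·L) scan by a trie-style divide and conquer (group by first
-- character, top-two group depths for cross pairs, recurse on tails): objective = faster.

-- ===== PORT A =====
-- the 'while i < size_1 and i < size_2 and str1[i] == str2[i]: i += 1' loop of common_prefix_length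
def pvCplAux (s1 s2 : List Char) (i : Nat) : Nat :=
  if h : i < s1.length ∧ i < s2.length ∧
      PySem.List.pyGetD s1 (i : Int) ' ' = PySem.List.pyGetD s2 (i : Int) ' ' then
    pvCplAux s1 s2 (i + 1)
  else i
termination_by s1.length - i
decreasing_by omega

def pvCpl (s1 s2 : List Char) : Nat := pvCplAux s1 s2 0

def get_max_distance_binary_strings_brute_fore (binary_strings : List String) : Int :=
  let bs := binary_strings.map String.toList
  if bs = [] then 0
  else
    (PySem.List.pyRange 0 bs.length 1).foldl (fun md i =>
      (PySem.List.pyRange (i + 1) bs.length 1).foldl (fun md j =>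
        let si := PySem.List.pyGetD bs i []
        let sj := PySem.List.pyGetD bs j []
        let c := pvCpl si sj
        max md (((si.length : Int) - c) + ((sj.length : Int) - c))) md) 0

-- ===== PORT B =====
-- 's and s[0] == c'
def pvHeadIs (c : Char) (s : List Char) : Bool :=
  match s with
  | [] => false
  | d :: _ => d == c

-- '[s[1:] for s in strings if s and s[0] == c]'  (s[1:] on a list is List.drop 1, exact)
def pvTails (strings : List (List Char)) (c : Char) : List (List Char) :=
  (strings.filter (pvHeadIs c)).map (List.drop 1)

-- '1 + max(len(t) for t in tails)' (tails is never empty when this is called; 0-default totalises)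
def pvGroupVal (strings : List (List Char)) (c : Char) : Int :=
  1 + ((PySem.List.max? ((pvTails strings c).map (fun t => (t.length : Int))) (fun x => x)).getD 0)

-- 'dict.fromkeys(s[0] for s in strings if s)'
def pvSeen (strings : List (List Char)) : List Char :=
  PySem.List.dedup (strings.filterMap List.head?)

-- the list 'vals' as it stands after the group loop (a 0 entry for an empty string, then one
-- '1 + max tail length' entry per first-character group, in first-occurrence order)
def pvVals (strings : List (List Char)) : List Int :=
  (if strings.any List.isEmpty then [(0 : Int)] else []) ++
    (pvSeen strings).map (pvGroupVal strings)

-- 'vs = sorted(vals, reverse=True); vs[0] + vs[1] if len(vs) > 1 else 0'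
def pvCross (strings : List (List Char)) : Int :=
  match PySem.List.sorted (pvVals strings) (fun x => x) true with
  | a :: b :: _ => a + b
  | _ => 0

-- 'def solve(strings)'; the fuel argument is only a termination guard (each recursion level
-- strips one leading character, so any fuel > max string length gives Python's value)
def pvSolve : Nat → List (List Char) → Int
  | 0, _ => 0
  | fuel + 1, strings =>
    ((pvSeen strings).map (pvTails strings)).foldl
      (fun best g => max best (pvSolve fuel g)) (pvCross strings)

def pvMaxLen (strings : List (List Char)) : Nat :=
  strings.foldl (fun m s => max m s.length) 0

def get_max_distance_binary_strings_brute_fore_alt (binary_strings : List String) : Int :=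
  let bs := binary_strings.map String.toList
  pvSolve (pvMaxLen bs + 1) bs

-- ===== PRECONDITION & SPEC =====
def Spec_get_max_distance_binary_strings_brute_fore (binary_strings : List String) (out : Int) : Prop := out = get_max_distance_binary_strings_brute_fore_alt binary_strings
instance (binary_strings : List String) (out : Int) : Decidable (Spec_get_max_distance_binary_strings_brute_fore binary_strings out) := by unfold Spec_get_max_distance_binary_strings_brute_fore; infer_instance

-- ===== CLAIM (what is proved, stated in full; the proofs are below) =====
def Claim_equal_get_max_distance_binary_strings_brute_fore : Prop := ∀ (binary_strings : List String), Dom_get_max_distance_binary_strings_brute_fore binary_strings → Spec_get_max_distance_binary_strings_brute_fore binary_strings (get_max_distance_binary_strings_brute_fore binary_strings)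

-- ===== LEMMAS AND PROOFS =====

-- longest common prefix and the pair distance, as proof-side reference notions
def pvLcp : List Char → List Char → Nat
  | c :: x, d :: y => if c = d then pvLcp x y + 1 else 0
  | _, _ => 0

def pvDist (x y : List Char) : Int :=
  ((x.length : Int) - pvLcp x y) + ((y.length : Int) - pvLcp x y)

-- the characterisation both ports are proved to satisfy: r is an upper bound on all pair
-- distances, nonnegative, and attained (or zero)
def pvGood (bs : List (List Char)) (r : Int) : Prop :=
  0 ≤ r ∧ (∀ x y, [x, y].Sublist bs → pvDist x y ≤ r) ∧
    (r = 0 ∨ ∃ x y, [x, y].Sublist bs ∧ pvDist x y = r)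

theorem pvGood_unique {bs : List (List Char)} {r r' : Int}
    (h : pvGood bs r) (h' : pvGood bs r') : r = r' := by
  obtain ⟨hr0, hrb, hra⟩ := h
  obtain ⟨hr0', hrb', hra'⟩ := h'
  rcases hra with h1 | ⟨x, y, hs, hd⟩ <;> rcases hra' with h2 | ⟨x', y', hs', hd'⟩
  · omega
  · have := hrb x' y' hs'; omega
  · have := hrb' x y hs; omega
  · have := hrb x' y' hs'; have := hrb' x y hs; omega

-- ---- basic facts about pvLcp / pvDist ----

theorem pvLcp_comm : ∀ x y : List Char, pvLcp x y = pvLcp y x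
  | [], [] => rfl
  | [], _ :: _ => rfl
  | _ :: _, [] => rfl
  | c :: x, d :: y => by
    by_cases h : c = d
    · subst h; simp [pvLcp, pvLcp_comm x y]
    · have h' : ¬ d = c := fun hh => h hh.symm
      simp [pvLcp, h, h']

theorem pvLcp_le_left : ∀ x y : List Char, pvLcp x y ≤ x.length
  | [], [] => by simp [pvLcp]
  | [], _ :: _ => by simp [pvLcp]
  | _ :: _, [] => by simp [pvLcp]
  | c :: x, d :: y => by
    by_cases h : c = d
    · subst h; simp [pvLcp]; exact pvLcp_le_left x y
    · simp [pvLcp, h]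

theorem pvDist_comm (x y : List Char) : pvDist x y = pvDist y x := by
  unfold pvDist; rw [pvLcp_comm]; ring

theorem pvDist_nil_left (y : List Char) : pvDist [] y = (y.length : Int) := by
  cases y <;> simp [pvDist, pvLcp]

theorem pvDist_cons_same (c : Char) (x y : List Char) :
    pvDist (c :: x) (c :: y) = pvDist x y := by
  simp [pvDist, pvLcp]

theorem pvDist_cons_ne {c d : Char} (h : c ≠ d) (x y : List Char) :
    pvDist (c :: x) (d :: y) = (1 + (x.length : Int)) + (1 + (y.length : Int)) := by
  simp [pvDist, pvLcp, h]; ring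

-- ---- small sublist utilities ----

theorem pvPair_sublist_of_idx {α : Type} :
    ∀ (l : List α) (i j : Nat) (x y : α), i < j → l[i]? = some x → l[j]? = some y →
      [x, y].Sublist l
  | [], i, j, x, y, _, hx, _ => by simp at hx
  | a :: t, 0, j, x, y, hij, hx, hy => by
    simp at hx; subst hx
    have hy' : y ∈ t := by
      obtain ⟨k, hk⟩ : ∃ k, j = k + 1 := ⟨j - 1, by omega⟩
      subst hk
      simp only [List.getElem?_cons_succ] at hy
      exact List.mem_of_getElem? hy
    exact (List.cons_sublist_cons).mpr (List.singleton_sublist.mpr hy')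
  | a :: t, i + 1, j, x, y, hij, hx, hy => by
    have hj : j = (j - 1) + 1 := by omega
    rw [hj] at hy
    simp only [List.getElem?_cons_succ] at hx hy
    exact (pvPair_sublist_of_idx t i (j - 1) x y (by omega) hx hy).cons a

theorem pvSublist_pair_idx {α : Type} :
    ∀ {l : List α} {x y : α}, [x, y].Sublist l →
      ∃ i j, i < j ∧ j < l.length ∧ l[i]? = some x ∧ l[j]? = some y := by
  intro l
  induction l with
  | nil => intro x y h; simp at h
  | cons a t ih =>
    intro x y h
    rcases List.sublist_cons_iff.mp h with h' | ⟨r, hr, hrt⟩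
    · obtain ⟨i, j, hij, hj, hx, hy⟩ := ih h'
      exact ⟨i + 1, j + 1, by omega, by simp; omega, by simpa, by simpa⟩
    · obtain ⟨hxa, hry⟩ := List.cons_eq_cons.mp hr
      subst hxa
      have hy : y ∈ t := by
        rw [← hry] at hrt
        exact List.singleton_sublist.mp hrt
      obtain ⟨j, hj, hyj⟩ := List.getElem_of_mem hy
      refine ⟨0, j + 1, by omega, by simp; omega, by simp, ?_⟩
      rw [List.getElem?_cons_succ]
      exact List.getElem?_eq_some_iff.mpr ⟨hj, hyj⟩

theorem pvMem_mem_ne_sublist {α : Type} :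
    ∀ {l : List α} {x y : α}, x ∈ l → y ∈ l → x ≠ y →
      [x, y].Sublist l ∨ [y, x].Sublist l := by
  intro l
  induction l with
  | nil => intro x y hx; simp at hx
  | cons a t ih =>
    intro x y hx hy hne
    rcases List.mem_cons.mp hx with rfl | hx'
    · have hy' : y ∈ t := by
        rcases List.mem_cons.mp hy with rfl | h
        · exact absurd rfl hne
        · exact h
      exact Or.inl ((List.cons_sublist_cons).mpr (List.singleton_sublist.mpr hy'))
    · rcases List.mem_cons.mp hy with rfl | hy'
      · exact Or.inr ((List.cons_sublist_cons).mpr (List.singleton_sublist.mpr hx'))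
      · exact (ih hx' hy' hne).imp (·.cons a) (·.cons a)

theorem pvNodup_map_pair {α β : Type} (f : α → β) :
    ∀ {l : List α} {c d : α}, l.Nodup → c ∈ l → d ∈ l → c ≠ d →
      [f c, f d].Sublist (l.map f) ∨ [f d, f c].Sublist (l.map f) := by
  intro l
  induction l with
  | nil => intro c d _ hc; simp at hc
  | cons a t ih =>
    intro c d hn hc hd hne
    have hn' := List.nodup_cons.mp hn
    rcases List.mem_cons.mp hc with rfl | hc'
    · have hd' : d ∈ t := by
        rcases List.mem_cons.mp hd with rfl | h
        · exact absurd rfl hne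
        · exact h
      exact Or.inl ((List.cons_sublist_cons).mpr
        (List.singleton_sublist.mpr (List.mem_map_of_mem hd')))
    · rcases List.mem_cons.mp hd with rfl | hd'
      · exact Or.inr ((List.cons_sublist_cons).mpr
          (List.singleton_sublist.mpr (List.mem_map_of_mem hc')))
      · exact (ih hn'.2 hc' hd' hne).imp (·.cons (f a)) (·.cons (f a))

theorem pvPerm_pair {α : Type} {l : List α} {x y : α} (h : l.Perm [x, y]) :
    l = [x, y] ∨ l = [y, x] := by
  have hl : l.length = 2 := by simpa using h.length_eq
  match l, hl with
  | [a, b], _ =>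
    have ha : a ∈ [x, y] := h.mem_iff.mp (by simp)
    simp at ha
    rcases ha with rfl | rfl
    · left
      have : [b].Perm [y] := (List.perm_cons a).mp h
      rw [List.perm_singleton] at this
      rw [this]
    · right
      have h2 : ([a, b] : List α).Perm [a, x] := h.trans (List.Perm.swap a x [])
      have : [b].Perm [x] := (List.perm_cons a).mp h2
      rw [List.perm_singleton] at this
      rw [this]

theorem pvPairwise_desc_pair_bound {l : List Int} {x y a b : Int} {rest : List Int}
    (hpw : l.Pairwise (fun p q => q ≤ p)) (hs : [x, y].Sublist l)
    (hl : l = a :: b :: rest) : x + y ≤ a + b := by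
  subst hl
  obtain ⟨ha, hpw'⟩ := List.pairwise_cons.mp hpw
  obtain ⟨hb, _⟩ := List.pairwise_cons.mp hpw'
  rcases List.sublist_cons_iff.mp hs with h' | ⟨r, hr, hrt⟩
  · -- [x, y] <+ b :: rest
    rcases List.sublist_cons_iff.mp h' with h'' | ⟨r', hr', hrt'⟩
    · -- both in rest
      have hx' : x ∈ rest := h''.subset (by simp)
      have hy' : y ∈ rest := h''.subset (by simp)
      have := hb x hx'
      have := hb y hy'
      have := ha b (by simp)
      omega
    · obtain ⟨hxb, hr'y⟩ := List.cons_eq_cons.mp hr'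
      subst hxb
      rw [← hr'y] at hrt'
      have hy' : y ∈ rest := List.singleton_sublist.mp hrt'
      have := hb y hy'
      have := ha x (by simp)
      omega
  · obtain ⟨hxa, hry⟩ := List.cons_eq_cons.mp hr
    subst hxa
    rw [← hry] at hrt
    have hy' : y ∈ b :: rest := List.singleton_sublist.mp hrt
    rcases List.mem_cons.mp hy' with rfl | hmem
    · omega
    · have := hb y hmem; omega

-- ---- the while loop of common_prefix_length computes pvLcp ----

theorem pvCplAux_eq : ∀ (s1 s2 : List Char) (i : Nat),
    pvCplAux s1 s2 i = i + pvLcp (s1.drop i) (s2.drop i) := by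
  intro s1 s2 i
  fun_induction pvCplAux s1 s2 i with
  | case1 i h ih =>
    obtain ⟨h1, h2, h3⟩ := h
    rw [ih]
    rw [List.drop_eq_getElem_cons h1, List.drop_eq_getElem_cons h2]
    rw [PySem.List.pyGetD_eq_getElem s1 ' ' (by omega) (by exact_mod_cast h1),
        PySem.List.pyGetD_eq_getElem s2 ' ' (by omega) (by exact_mod_cast h2)] at h3
    simp only [Int.toNat_natCast] at h3
    simp [pvLcp, h3]
    omega
  | case2 i h =>
    rcases Nat.lt_or_ge i s1.length with h1 | h1
    · rcases Nat.lt_or_ge i s2.length with h2 | h2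
      · have h3 : PySem.List.pyGetD s1 (i : Int) ' ' ≠ PySem.List.pyGetD s2 (i : Int) ' ' := by
          intro hc; exact h ⟨h1, h2, hc⟩
        rw [PySem.List.pyGetD_eq_getElem s1 ' ' (by omega) (by exact_mod_cast h1),
            PySem.List.pyGetD_eq_getElem s2 ' ' (by omega) (by exact_mod_cast h2)] at h3
        simp only [Int.toNat_natCast] at h3
        rw [List.drop_eq_getElem_cons h1, List.drop_eq_getElem_cons h2]
        simp [pvLcp, h3]
      · rw [List.drop_eq_nil_of_le h2, pvLcp_comm]
        simp [pvLcp]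
    · rw [List.drop_eq_nil_of_le h1]
      simp [pvLcp]

theorem pvCpl_eq (s1 s2 : List Char) : pvCpl s1 s2 = pvLcp s1 s2 := by
  unfold pvCpl
  rw [pvCplAux_eq]
  simp

-- ---- generic max-fold lemmas ----

theorem pvLe_foldl_max {α : Type} (g : α → Int) :
    ∀ (l : List α) (a : Int), a ≤ l.foldl (fun m e => max m (g e)) a ∧
      ∀ e ∈ l, g e ≤ l.foldl (fun m e => max m (g e)) a := by
  intro l
  induction l with
  | nil => intro a; simp
  | cons x t ih =>
    intro a
    constructor
    · exact le_trans (le_max_left a (g x)) (ih (max a (g x))).1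
    · intro e he
      rcases List.mem_cons.mp he with rfl | he'
      · exact le_trans (le_max_right a (g e)) (ih (max a (g e))).1
      · exact (ih (max a (g x))).2 e he'

theorem pvFoldl_max_attained {α : Type} (g : α → Int) :
    ∀ (l : List α) (a : Int), l.foldl (fun m e => max m (g e)) a = a ∨
      ∃ e ∈ l, l.foldl (fun m e => max m (g e)) a = g e := by
  intro l
  induction l with
  | nil => intro a; simp
  | cons x t ih =>
    intro a
    simp only [List.foldl_cons]
    rcases ih (max a (g x)) with h | ⟨e, he, hee⟩
    · rcases max_choice a (g x) with hm | hm
      · left; rw [h, hm]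
      · right; exact ⟨x, by simp, by rw [h, hm]⟩
    · right; exact ⟨e, by simp [he], hee⟩

-- ---- nested max-fold lemmas (the shape of port A's double loop) ----

theorem pvNested_init_le (g : Int → Int → Int) (R : Int → List Int) :
    ∀ (outer : List Int) (a : Int),
      a ≤ outer.foldl (fun md i => (R i).foldl (fun md j => max md (g i j)) md) a := by
  intro outer
  induction outer with
  | nil => intro a; simp
  | cons i t ih =>
    intro a
    simp only [List.foldl_cons]
    exact le_trans (pvLe_foldl_max (g i) (R i) a).1 (ih _)

theorem pvNested_bound (g : Int → Int → Int) (R : Int → List Int) :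
    ∀ (outer : List Int) (a : Int) (i : Int), i ∈ outer → ∀ j ∈ R i,
      g i j ≤ outer.foldl (fun md i => (R i).foldl (fun md j => max md (g i j)) md) a := by
  intro outer
  induction outer with
  | nil => intro a i hi; simp at hi
  | cons i0 t ih =>
    intro a i hi j hj
    simp only [List.foldl_cons]
    rcases List.mem_cons.mp hi with rfl | hi'
    · exact le_trans ((pvLe_foldl_max (g i) (R i) a).2 j hj)
        (pvNested_init_le g R t _)
    · exact ih _ i hi' j hj

theorem pvNested_attained (g : Int → Int → Int) (R : Int → List Int) :
    ∀ (outer : List Int) (a : Int),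
      outer.foldl (fun md i => (R i).foldl (fun md j => max md (g i j)) md) a = a ∨
        ∃ i ∈ outer, ∃ j ∈ R i,
          outer.foldl (fun md i => (R i).foldl (fun md j => max md (g i j)) md) a = g i j := by
  intro outer
  induction outer with
  | nil => intro a; simp
  | cons i0 t ih =>
    intro a
    simp only [List.foldl_cons]
    rcases ih ((R i0).foldl (fun md j => max md (g i0 j)) a) with h | ⟨i, hi, j, hj, hee⟩
    · rcases pvFoldl_max_attained (g i0) (R i0) a with h' | ⟨j, hj, hee⟩
      · left; rw [h, h']
      · right; exact ⟨i0, by simp, j, hj, by rw [h, hee]⟩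
    · right; exact ⟨i, by simp [hi], j, hj, hee⟩

-- ---- port A computes a pvGood value ----

theorem pvA_good' (l : List (List Char)) :
    pvGood l ((PySem.List.pyRange 0 (l.length : Int) 1).foldl (fun md i =>
      (PySem.List.pyRange (i + 1) (l.length : Int) 1).foldl (fun md j =>
        max md ((((PySem.List.pyGetD l i []).length : Int) - pvCpl (PySem.List.pyGetD l i []) (PySem.List.pyGetD l j [])) +
          (((PySem.List.pyGetD l j []).length : Int) - pvCpl (PySem.List.pyGetD l i []) (PySem.List.pyGetD l j [])))) md) 0) := by
  set g : Int → Int → Int := fun i j =>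
    (((PySem.List.pyGetD l i []).length : Int) - pvCpl (PySem.List.pyGetD l i []) (PySem.List.pyGetD l j [])) +
      (((PySem.List.pyGetD l j []).length : Int) - pvCpl (PySem.List.pyGetD l i []) (PySem.List.pyGetD l j [])) with hg
  set R : Int → List Int := fun i => PySem.List.pyRange (i + 1) (l.length : Int) 1 with hR
  set outer := PySem.List.pyRange 0 (l.length : Int) 1 with houter
  have hpay : ∀ (i j : Nat) (x y : List Char), i < j → l[i]? = some x → l[j]? = some y →
      g (i : Int) (j : Int) = pvDist x y := by
    intro i j x y hij hx hy
    obtain ⟨hi', hxe⟩ := List.getElem?_eq_some_iff.mp hx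
    obtain ⟨hj', hye⟩ := List.getElem?_eq_some_iff.mp hy
    rw [hg]
    simp only
    rw [PySem.List.pyGetD_eq_getElem l [] (by omega) (by exact_mod_cast hi'),
        PySem.List.pyGetD_eq_getElem l [] (by omega) (by exact_mod_cast hj')]
    simp only [Int.toNat_natCast]
    rw [hxe, hye, pvCpl_eq]
    unfold pvDist
    ring
  refine ⟨?_, ?_, ?_⟩
  · exact pvNested_init_le g R outer 0
  · intro x y hsub
    obtain ⟨i, j, hij, hjl, hx, hy⟩ := pvSublist_pair_idx hsub
    have hmi : (i : Int) ∈ outer := by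
      rw [houter, PySem.List.mem_pyRange_one]
      constructor <;> [omega; exact_mod_cast Nat.lt_of_lt_of_le hij (by omega)]
    have hmj : (j : Int) ∈ R (i : Int) := by
      rw [hR]
      simp only
      rw [PySem.List.mem_pyRange_one]
      constructor
      · exact_mod_cast hij
      · exact_mod_cast hjl
    have := pvNested_bound g R outer 0 (i : Int) hmi (j : Int) hmj
    rwa [hpay i j x y hij hx hy] at this
  · rcases pvNested_attained g R outer 0 with h | ⟨i, hi, j, hj, hee⟩
    · exact Or.inl h
    · right
      rw [houter, PySem.List.mem_pyRange_one] at hi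
      rw [hR] at hj
      simp only at hj
      rw [PySem.List.mem_pyRange_one] at hj
      have hi0 : 0 ≤ i := hi.1
      have hij : i < j := by omega
      have hjl : j < (l.length : Int) := hj.2
      obtain ⟨iN, rfl⟩ : ∃ n : Nat, i = (n : Int) := ⟨i.toNat, by omega⟩
      obtain ⟨jN, rfl⟩ : ∃ n : Nat, j = (n : Int) := ⟨j.toNat, by omega⟩
      have hijN : iN < jN := by exact_mod_cast hij
      have hjlN : jN < l.length := by exact_mod_cast hjl
      have hx : l[iN]? = some l[iN] := List.getElem?_eq_some_iff.mpr ⟨by omega, rfl⟩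
      have hy : l[jN]? = some l[jN] := List.getElem?_eq_some_iff.mpr ⟨hjlN, rfl⟩
      refine ⟨l[iN], l[jN], pvPair_sublist_of_idx l iN jN _ _ hijN hx hy, ?_⟩
      rw [← hpay iN jN _ _ hijN hx hy, hee]

-- ---- facts about pvSeen / pvTails / pvGroupVal / pvVals / pvCross ----

theorem pvMem_seen_iff (strings : List (List Char)) (c : Char) :
    c ∈ pvSeen strings ↔ ∃ s ∈ strings, s.head? = some c := by
  unfold pvSeen
  rw [PySem.List.mem_dedup]
  simp [List.mem_filterMap]

theorem pvSeen_nodup (strings : List (List Char)) : (pvSeen strings).Nodup :=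
  PySem.List.nodup_dedup _

theorem pvMem_tails_iff (strings : List (List Char)) (c : Char) (u : List Char) :
    u ∈ pvTails strings c ↔ (c :: u) ∈ strings := by
  unfold pvTails
  simp only [List.mem_map, List.mem_filter]
  constructor
  · rintro ⟨s, ⟨hs, hh⟩, rfl⟩
    cases s with
    | nil => simp [pvHeadIs] at hh
    | cons d t =>
      simp only [pvHeadIs, beq_iff_eq] at hh
      subst hh
      simpa using hs
  · intro h
    exact ⟨c :: u, ⟨h, by simp [pvHeadIs]⟩, by simp⟩

theorem pvHead_mem_seen {strings : List (List Char)} {c : Char} {u : List Char}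
    (h : (c :: u) ∈ strings) : c ∈ pvSeen strings :=
  (pvMem_seen_iff strings c).mpr ⟨c :: u, h, rfl⟩

theorem pvGroupVal_ge {strings : List (List Char)} {c : Char} {u : List Char}
    (h : u ∈ pvTails strings c) : (u.length : Int) + 1 ≤ pvGroupVal strings c := by
  unfold pvGroupVal
  cases hm : PySem.List.max? ((pvTails strings c).map (fun t => (t.length : Int))) (fun x => x) with
  | none =>
    rw [PySem.List.max?_eq_none_iff] at hm
    rw [List.map_eq_nil_iff] at hm
    rw [hm] at h
    simp at h
  | some m =>
    have := PySem.List.max?_isMax hm ((u.length : Int)) (List.mem_map_of_mem h)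
    simp only [Option.getD_some]
    omega

theorem pvGroupVal_attained {strings : List (List Char)} {c : Char}
    (h : c ∈ pvSeen strings) :
    ∃ u ∈ pvTails strings c, pvGroupVal strings c = 1 + (u.length : Int) := by
  obtain ⟨s, hs, hh⟩ := (pvMem_seen_iff strings c).mp h
  cases s with
  | nil => simp at hh
  | cons d t =>
    simp only [List.head?_cons, Option.some.injEq] at hh
    obtain rfl : c = d := hh.symm
    have ht : t ∈ pvTails strings c := (pvMem_tails_iff strings c t).mpr hs
    cases hm : PySem.List.max? ((pvTails strings c).map (fun t => (t.length : Int))) (fun x => x) with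
    | none =>
      rw [PySem.List.max?_eq_none_iff, List.map_eq_nil_iff] at hm
      rw [hm] at ht
      simp at ht
    | some m =>
      obtain ⟨u, hu, hum⟩ := List.mem_map.mp (PySem.List.max?_mem hm)
      refine ⟨u, hu, ?_⟩
      unfold pvGroupVal
      rw [hm, hum]
      simp

theorem pvGroupVal_pos (strings : List (List Char)) (c : Char) :
    (1 : Int) ≤ pvGroupVal strings c := by
  unfold pvGroupVal
  cases hm : PySem.List.max? ((pvTails strings c).map (fun t => (t.length : Int))) (fun x => x) with
  | none => simp
  | some m =>
    obtain ⟨u, _, hum⟩ := List.mem_map.mp (PySem.List.max?_mem hm)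
    simp only [Option.getD_some]
    omega

theorem pvVals_nonneg {strings : List (List Char)} : ∀ v ∈ pvVals strings, 0 ≤ v := by
  intro v hv
  unfold pvVals at hv
  rcases List.mem_append.mp hv with h | h
  · split at h <;> simp_all
  · obtain ⟨c, _, rfl⟩ := List.mem_map.mp h
    have := pvGroupVal_pos strings c
    omega

theorem pvPair_zero_val {strings : List (List Char)} {d : Char}
    (hemp : strings.any List.isEmpty = true) (hd : d ∈ pvSeen strings) :
    [0, pvGroupVal strings d].Sublist (pvVals strings) := by
  unfold pvVals
  rw [if_pos hemp]
  exact List.cons_sublist_cons.mpr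
    (List.singleton_sublist.mpr (List.mem_map_of_mem hd))

theorem pvPair_two_vals {strings : List (List Char)} {c d : Char}
    (hc : c ∈ pvSeen strings) (hd : d ∈ pvSeen strings) (hne : c ≠ d) :
    [pvGroupVal strings c, pvGroupVal strings d].Sublist (pvVals strings) ∨
      [pvGroupVal strings d, pvGroupVal strings c].Sublist (pvVals strings) := by
  have hmap := pvNodup_map_pair (pvGroupVal strings) (pvSeen_nodup strings) hc hd hne
  have hsub : ((pvSeen strings).map (pvGroupVal strings)).Sublist (pvVals strings) := by
    unfold pvVals
    exact List.sublist_append_right _ _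
  exact hmap.imp (·.trans hsub) (·.trans hsub)

theorem pvCross_ge_pair {strings : List (List Char)} {p q : Int}
    (h : [p, q].Sublist (pvVals strings)) : p + q ≤ pvCross strings := by
  have hsp : [p, q].Subperm (PySem.List.sorted (pvVals strings) (fun x => x) true) :=
    h.subperm.trans (PySem.List.sorted_perm (pvVals strings) (fun x => x) true).symm.subperm
  obtain ⟨m, hmp, hms⟩ := hsp
  have hpw : (PySem.List.sorted (pvVals strings) (fun x => x) true).Pairwise
      (fun a b : Int => b ≤ a) := PySem.List.sorted_pairwise_rev (pvVals strings) (fun x => x)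
  unfold pvCross
  cases hvs : PySem.List.sorted (pvVals strings) (fun x => x) true with
  | nil =>
    rw [hvs] at hms
    have := hms.length_le
    rcases pvPerm_pair hmp with rfl | rfl <;> simp at this
  | cons a t =>
    cases t with
    | nil =>
      rw [hvs] at hms
      have := hms.length_le
      rcases pvPerm_pair hmp with rfl | rfl <;> simp at this
    | cons b t2 =>
      rw [hvs] at hms hpw
      have hred : (match a :: b :: t2 with
        | a :: b :: _ => a + b
        | _ => (0 : Int)) = a + b := rfl
      rw [hred]
      rcases pvPerm_pair hmp with rfl | rfl
      · exact pvPairwise_desc_pair_bound hpw hms rfl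
      · have := pvPairwise_desc_pair_bound hpw hms rfl
        omega

theorem pvCross_cases (strings : List (List Char)) :
    pvCross strings = 0 ∨
      ∃ p q, [p, q].Sublist (pvVals strings) ∧ p + q = pvCross strings := by
  unfold pvCross
  cases hvs : PySem.List.sorted (pvVals strings) (fun x => x) true with
  | nil => exact Or.inl rfl
  | cons a t =>
    cases t with
    | nil => exact Or.inl rfl
    | cons b t2 =>
      right
      have hsub : [a, b].Sublist (PySem.List.sorted (pvVals strings) (fun x => x) true) := by
        rw [hvs]
        exact List.cons_sublist_cons.mpr (List.cons_sublist_cons.mpr (List.nil_sublist _))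
      have hsp : [a, b].Subperm (pvVals strings) :=
        hsub.subperm.trans (PySem.List.sorted_perm (pvVals strings) (fun x => x) true).subperm
      obtain ⟨m, hmp, hms⟩ := hsp
      have hred : (match a :: b :: t2 with
        | a :: b :: _ => a + b
        | _ => (0 : Int)) = a + b := rfl
      rw [hred]
      rcases pvPerm_pair hmp with rfl | rfl
      · exact ⟨a, b, hms, rfl⟩
      · exact ⟨b, a, hms, by omega⟩

theorem pvCross_nonneg (strings : List (List Char)) : 0 ≤ pvCross strings := by
  rcases pvCross_cases strings with h | ⟨p, q, hpq, hsum⟩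
  · omega
  · have hp := pvVals_nonneg p (hpq.subset (by simp))
    have hq := pvVals_nonneg q (hpq.subset (by simp))
    omega

theorem pvTails_pair_up {strings : List (List Char)} {c : Char} {u v : List Char}
    (h : [u, v].Sublist (pvTails strings c)) :
    [c :: u, c :: v].Sublist strings := by
  have h2 := h.map (fun t => c :: t)
  have h3 : (pvTails strings c).map (fun t => c :: t) = strings.filter (pvHeadIs c) := by
    unfold pvTails
    rw [List.map_map]
    have : ∀ s ∈ strings.filter (pvHeadIs c),
        ((fun t => c :: t) ∘ List.drop 1) s = id s := by
      intro s hs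
      have hh := (List.mem_filter.mp hs).2
      cases s with
      | nil => simp [pvHeadIs] at hh
      | cons d t =>
        simp only [pvHeadIs, beq_iff_eq] at hh
        subst hh
        simp
    rw [List.map_congr_left this, List.map_id]
  rw [h3] at h2
  exact h2.trans (List.filter_sublist : (strings.filter (pvHeadIs c)).Sublist strings)

theorem pvTails_pair_down {strings : List (List Char)} {c : Char} {u v : List Char}
    (h : [c :: u, c :: v].Sublist strings) : [u, v].Sublist (pvTails strings c) := by
  have h2 := h.filter (pvHeadIs c)
  have heq : ([c :: u, c :: v] : List (List Char)).filter (pvHeadIs c) = [c :: u, c :: v] := by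
    simp [pvHeadIs]
  rw [heq] at h2
  have h3 := h2.map (List.drop 1)
  simpa [pvTails] using h3

theorem pvVals_map_pair {strings : List (List Char)} {p q : Int}
    (h : [p, q].Sublist ((pvSeen strings).map (pvGroupVal strings))) :
    ∃ c d, c ∈ pvSeen strings ∧ d ∈ pvSeen strings ∧ c ≠ d ∧
      p = pvGroupVal strings c ∧ q = pvGroupVal strings d := by
  rw [List.sublist_map_iff] at h
  obtain ⟨l', hl', heq⟩ := h
  have hlen : l'.length = 2 := by
    have := congrArg List.length heq
    simpa using this.symm
  match l', hlen with
  | [c, d], _ =>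
    obtain ⟨hp, hq⟩ : p = pvGroupVal strings c ∧ q = pvGroupVal strings d := by
      simpa using heq
    have hcd : c ≠ d := by
      have := (pvSeen_nodup strings).sublist hl'
      simp at this
      exact this
    exact ⟨c, d, hl'.subset (by simp), hl'.subset (by simp), hcd, hp, hq⟩

theorem pvVals_pair_cases {strings : List (List Char)} {p q : Int}
    (h : [p, q].Sublist (pvVals strings)) :
    (p = 0 ∧ ([] ∈ strings) ∧ ∃ d ∈ pvSeen strings, q = pvGroupVal strings d) ∨
      (∃ c d, c ∈ pvSeen strings ∧ d ∈ pvSeen strings ∧ c ≠ d ∧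
        p = pvGroupVal strings c ∧ q = pvGroupVal strings d) := by
  unfold pvVals at h
  by_cases hemp : strings.any List.isEmpty = true
  · rw [if_pos hemp] at h
    simp only [List.singleton_append] at h
    rcases List.sublist_cons_iff.mp h with h' | ⟨r, hr, hrt⟩
    · exact Or.inr (pvVals_map_pair h')
    · obtain ⟨hp0, hry⟩ := List.cons_eq_cons.mp hr
      left
      refine ⟨hp0, ?_, ?_⟩
      · obtain ⟨s, hs, hse⟩ := List.any_eq_true.mp hemp
        rw [List.isEmpty_iff] at hse
        exact hse ▸ hs
      · rw [← hry] at hrt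
        have hq : q ∈ (pvSeen strings).map (pvGroupVal strings) :=
          List.singleton_sublist.mp hrt
        obtain ⟨d, hd, hdq⟩ := List.mem_map.mp hq
        exact ⟨d, hd, hdq.symm⟩
  · rw [if_neg hemp] at h
    simp only [List.nil_append] at h
    exact Or.inr (pvVals_map_pair h)

theorem pvPair_entries_to_strings {strings : List (List Char)} {p q : Int}
    (h : [p, q].Sublist (pvVals strings)) :
    ∃ x y, [x, y].Sublist strings ∧ pvDist x y = p + q := by
  rcases pvVals_pair_cases h with ⟨hp0, hnil, d, hd, hq⟩ | ⟨c, d, hc, hd, hcd, hp, hq⟩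
  · obtain ⟨u, hu, huq⟩ := pvGroupVal_attained hd
    have hy : (d :: u) ∈ strings := (pvMem_tails_iff strings d u).mp hu
    have hne : ([] : List Char) ≠ d :: u := by simp
    have hdist : pvDist [] (d :: u) = p + q := by
      rw [pvDist_nil_left]
      simp only [List.length_cons]
      push_cast
      omega
    rcases pvMem_mem_ne_sublist hnil hy hne with hs | hs
    · exact ⟨[], d :: u, hs, hdist⟩
    · exact ⟨d :: u, [], hs, by rw [pvDist_comm]; exact hdist⟩
  · obtain ⟨u, hu, huc⟩ := pvGroupVal_attained hc
    obtain ⟨v, hv, hvd⟩ := pvGroupVal_attained hd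
    have hx : (c :: u) ∈ strings := (pvMem_tails_iff strings c u).mp hu
    have hy : (d :: v) ∈ strings := (pvMem_tails_iff strings d v).mp hv
    have hne : (c :: u) ≠ d :: v := by
      intro hc'
      exact hcd (List.cons_eq_cons.mp hc').1
    have hdist : pvDist (c :: u) (d :: v) = p + q := by
      rw [pvDist_cons_ne hcd]
      omega
    rcases pvMem_mem_ne_sublist hx hy hne with hs | hs
    · exact ⟨c :: u, d :: v, hs, hdist⟩
    · exact ⟨d :: v, c :: u, hs, by rw [pvDist_comm]; exact hdist⟩

theorem pvSolve_good : ∀ (fuel : Nat) (strings : List (List Char)),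
    (∀ s ∈ strings, s.length < fuel) → pvGood strings (pvSolve fuel strings) := by
  intro fuel
  induction fuel with
  | zero =>
    intro strings hlen
    cases strings with
    | nil =>
      exact ⟨le_refl 0, fun x y hsub => absurd hsub (by simp), Or.inl rfl⟩
    | cons s t => exact absurd (hlen s (by simp)) (by omega)
  | succ fuel ih =>
    intro strings hlen
    rw [pvSolve]
    set groups := (pvSeen strings).map (pvTails strings) with hgroups
    have hinit := pvLe_foldl_max (pvSolve fuel) groups (pvCross strings)
    set r := groups.foldl (fun best g => max best (pvSolve fuel g)) (pvCross strings) with hr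
    have hIH : ∀ c ∈ pvSeen strings, pvGood (pvTails strings c) (pvSolve fuel (pvTails strings c)) := by
      intro c hc
      apply ih
      intro u hu
      have := hlen (c :: u) ((pvMem_tails_iff strings c u).mp hu)
      simp only [List.length_cons] at this
      omega
    have hsolve_le : ∀ c ∈ pvSeen strings, pvSolve fuel (pvTails strings c) ≤ r := by
      intro c hc
      exact hinit.2 (pvTails strings c) (List.mem_map_of_mem hc)
    have hcross_le : pvCross strings ≤ r := hinit.1
    refine ⟨le_trans (pvCross_nonneg strings) hcross_le, ?_, ?_⟩
    · intro x y hsub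
      have hx : x ∈ strings := hsub.subset (by simp)
      have hy : y ∈ strings := hsub.subset (by simp)
      cases x with
      | nil =>
        cases y with
        | nil =>
          have h0 : pvDist [] [] = 0 := by rw [pvDist_nil_left]; rfl
          rw [h0]
          exact le_trans (pvCross_nonneg strings) hcross_le
        | cons d v =>
          have hemp : strings.any List.isEmpty = true :=
            List.any_eq_true.mpr ⟨[], hx, rfl⟩
          have hd : d ∈ pvSeen strings := pvHead_mem_seen hy
          have hv : v ∈ pvTails strings d := (pvMem_tails_iff strings d v).mpr hy
          have hge := pvGroupVal_ge hv
          have hcr := pvCross_ge_pair (pvPair_zero_val hemp hd)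
          rw [pvDist_nil_left]
          simp only [List.length_cons]
          push_cast
          omega
      | cons c u =>
        cases y with
        | nil =>
          have hemp : strings.any List.isEmpty = true :=
            List.any_eq_true.mpr ⟨[], hy, rfl⟩
          have hc : c ∈ pvSeen strings := pvHead_mem_seen hx
          have hu : u ∈ pvTails strings c := (pvMem_tails_iff strings c u).mpr hx
          have hge := pvGroupVal_ge hu
          have hcr := pvCross_ge_pair (pvPair_zero_val hemp hc)
          rw [pvDist_comm, pvDist_nil_left]
          simp only [List.length_cons]
          push_cast
          omega
        | cons d v =>
          by_cases hcd : c = d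
          · subst hcd
            have hc : c ∈ pvSeen strings := pvHead_mem_seen hx
            have huv := pvTails_pair_down hsub
            have hb := (hIH c hc).2.1 u v huv
            rw [pvDist_cons_same]
            exact le_trans hb (hsolve_le c hc)
          · have hc : c ∈ pvSeen strings := pvHead_mem_seen hx
            have hd : d ∈ pvSeen strings := pvHead_mem_seen hy
            have hu : u ∈ pvTails strings c := (pvMem_tails_iff strings c u).mpr hx
            have hv : v ∈ pvTails strings d := (pvMem_tails_iff strings d v).mpr hy
            have hgu := pvGroupVal_ge hu
            have hgv := pvGroupVal_ge hv
            have hcr : pvGroupVal strings c + pvGroupVal strings d ≤ pvCross strings := by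
              rcases pvPair_two_vals hc hd hcd with hpair | hpair
              · exact pvCross_ge_pair hpair
              · have := pvCross_ge_pair hpair
                omega
            rw [pvDist_cons_ne hcd]
            omega
    · rcases pvFoldl_max_attained (pvSolve fuel) groups (pvCross strings) with hatt | ⟨gp, hgp, hee⟩
      · rw [← hr] at hatt
        rcases pvCross_cases strings with h0 | ⟨p, q, hpq, hsum⟩
        · exact Or.inl (by rw [hatt, h0])
        · right
          obtain ⟨x, y, hxy, hdxy⟩ := pvPair_entries_to_strings hpq
          exact ⟨x, y, hxy, by rw [hdxy, hsum, ← hatt]⟩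
      · rw [← hr] at hee
        obtain ⟨c, hc, rfl⟩ := List.mem_map.mp hgp
        rcases (hIH c hc).2.2 with h0 | ⟨u, v, huv, hduv⟩
        · exact Or.inl (by rw [hee, h0])
        · right
          refine ⟨c :: u, c :: v, pvTails_pair_up huv, ?_⟩
          rw [pvDist_cons_same, hduv, ← hee]

theorem pvA_good (binary_strings : List String) :
    pvGood (binary_strings.map String.toList)
      (get_max_distance_binary_strings_brute_fore binary_strings) := by
  unfold get_max_distance_binary_strings_brute_fore
  by_cases h : binary_strings.map String.toList = []
  · rw [h, if_pos rfl]
    exact ⟨le_refl 0, fun x y hsub => absurd hsub (by simp), Or.inl rfl⟩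
  · simp only [if_neg h]
    exact pvA_good' (binary_strings.map String.toList)

-- ===== VERDICT (by name: the statement is the Claim_ definition above) =====
theorem get_max_distance_binary_strings_brute_fore_spec : Claim_equal_get_max_distance_binary_strings_brute_fore := by
  intro bs _
  unfold Spec_get_max_distance_binary_strings_brute_fore
  refine pvGood_unique (pvA_good bs) ?_
  unfold get_max_distance_binary_strings_brute_fore_alt
  refine pvSolve_good _ _ ?_
  intro s hs
  have := (PySem.List.le_foldl_max_nat (bs.map String.toList) List.length 0).2 s hs
  unfold pvMaxLen
  omega
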